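-- pv_equiv track=rewrite | github.com/heffrey78/lifecycle-mcp | src/lifecycle_mcp/handlers/relationship_handler.py | _format_entity_relationships_details
-- ===== SOURCE A (Python) =====
-- from typing import Any
--
-- def _format_entity_relationships_details(entity_id: str, relationships: list[dict[str, Any]]) -> str:
--     """Format entity relationships for detailed display"""
--     if not relationships:
--         return f"Entity {entity_id} has no relationships."
--
--     lines = [f"# Relationships for {entity_id}\n"]
--
--     # Group by relationship type
--     by_type = {}
--     for rel in relationships:
--         rel_type = rel["type"]
--         if rel_type not in by_type:
--             by_type[rel_type] = []
--         by_type[rel_type].append(rel)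
--
--     for rel_type, rels in by_type.items():
--         lines.append(f"## {rel_type.title()} ({len(rels)})")
--         for rel in rels:
--             if rel["source_id"] == entity_id:
--                 # Outgoing relationship
--                 target_title = rel.get("target_title", rel["target_id"])
--                 lines.append(f"- → **{target_title}** ({rel['target_id']})")
--             else:
--                 # Incoming relationship
--                 source_title = rel.get("source_title", rel["source_id"])
--                 lines.append(f"- ← **{source_title}** ({rel['source_id']})")
--         lines.append("")
--
--     return "\n".join(lines)
-- ===== SOURCE B (Python) =====
-- def _format_entity_relationships_details(entity_id: str, relationships: list) -> str:
--     """Format entity relationships for detailed display"""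
--     if not relationships:
--         return f"Entity {entity_id} has no relationships."
--
--     # distinct relationship types in first-appearance order
--     types = list(dict.fromkeys(rel["type"] for rel in relationships))
--
--     lines = [f"# Relationships for {entity_id}\n"]
--     for rel_type in types:
--         group = [rel for rel in relationships if rel["type"] == rel_type]
--         lines.append(f"## {rel_type.title()} ({len(group)})")
--         for rel in group:
--             if rel["source_id"] == entity_id:
--                 target_title = rel.get("target_title", rel["target_id"])
--                 lines.append(f"- → **{target_title}** ({rel['target_id']})")
--             else:
--                 source_title = rel.get("source_title", rel["source_id"])
--                 lines.append(f"- ← **{source_title}** ({rel['source_id']})")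
--         lines.append("")
--     return "\n".join(lines)
-- ===== Notes on version B (the rewrite author's own statement) =====
-- stated objective: alternative
-- what changed: Replaces A's incrementally mutated grouping dict with a staged decomposition: one dedup pass collects the distinct relationship types in first-appearance order, then each type's block is built by filtering the relationships list; Pre_ excludes exactly the inputs where A raises KeyError (a relationship missing 'type' or 'source_id', or an outgoing one missing 'target_id').
import Mathlib
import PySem

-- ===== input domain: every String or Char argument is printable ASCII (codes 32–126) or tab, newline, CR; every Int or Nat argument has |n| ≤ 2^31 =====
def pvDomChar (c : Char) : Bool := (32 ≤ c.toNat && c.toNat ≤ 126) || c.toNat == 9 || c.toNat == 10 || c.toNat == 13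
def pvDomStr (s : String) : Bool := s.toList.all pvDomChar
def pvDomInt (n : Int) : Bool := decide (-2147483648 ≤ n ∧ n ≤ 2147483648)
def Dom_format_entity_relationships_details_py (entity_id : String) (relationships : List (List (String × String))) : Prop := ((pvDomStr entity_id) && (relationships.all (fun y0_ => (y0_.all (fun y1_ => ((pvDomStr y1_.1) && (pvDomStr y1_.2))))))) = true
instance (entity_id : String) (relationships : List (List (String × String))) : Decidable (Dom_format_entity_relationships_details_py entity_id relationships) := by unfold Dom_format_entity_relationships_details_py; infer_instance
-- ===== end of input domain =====

-- B replaces A's mutated grouping dict by a staged decomposition: one dedup pass collecting the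
-- distinct relationship types in first-appearance order, then per type a filter of the list
-- (objective: alternative — same output, different data flow; return-value equivalence only).

-- shared formatting helpers (identical text in both Pythons)

-- rel[k] (Pre_ guarantees the key is present where Python evaluates it; first-match lookup)
def pvKey (rel : List (String × String)) (k : String) : String :=
  (PySem.Dict.mk rel).getD k ""

-- rel.get(k, dflt)
def pvGet (rel : List (String × String)) (k : String) (dflt : String) : String :=
  (PySem.Dict.mk rel).getD k dflt

-- str.title(), exact on the ASCII domain: a letter is upper-cased after a non-letter, lower-cased after a letter
def pvTitleChars (cs : List Char) : List Char :=
  (cs.foldl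
    (fun (st : List Char × Bool) c =>
      (st.1 ++ [if PySem.Chars.isalpha c then
                  (if st.2 then PySem.Chars.lowerChar c else PySem.Chars.upperChar c)
                else c],
       PySem.Chars.isalpha c))
    (([] : List Char), false)).1

def pvTitle (s : String) : String := String.ofList (pvTitleChars s.toList)

-- "- → **{title}** ({id})" / "- ← **{title}** ({id})"
def pvRelLine (entity_id : String) (rel : List (String × String)) : String :=
  if pvKey rel "source_id" == entity_id then
    "- → **" ++ pvGet rel "target_title" (pvKey rel "target_id") ++ "** (" ++ pvKey rel "target_id" ++ ")"
  else
    "- ← **" ++ pvGet rel "source_title" (pvKey rel "source_id") ++ "** (" ++ pvKey rel "source_id" ++ ")"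

-- "## {rel_type.title()} ({n})"
def pvHeader (rel_type : String) (n : Nat) : String :=
  "## " ++ pvTitle rel_type ++ " (" ++ PySem.Int.toStr (n : Int) ++ ")"

-- ===== PORT A =====
def format_entity_relationships_details_py (entity_id : String) (relationships : List (List (String × String))) : String :=
  if relationships = [] then
    "Entity " ++ entity_id ++ " has no relationships."
  else
    let lines : List String := ["# Relationships for " ++ entity_id ++ "\n"]
    -- Group by relationship type
    let by_type : PySem.Dict String (List (List (String × String))) :=
      relationships.foldl
        (fun by_type rel =>
          let rel_type := pvKey rel "type"
          let by_type := if by_type.contains rel_type then by_type else by_type.insert rel_type []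
          by_type.insert rel_type (by_type.getD rel_type [] ++ [rel]))
        PySem.Dict.empty
    let lines :=
      by_type.items.foldl
        (fun lines tr =>
          let lines := lines ++ [pvHeader tr.1 tr.2.length]
          let lines := tr.2.foldl (fun lines rel => lines ++ [pvRelLine entity_id rel]) lines
          lines ++ [""])
        lines
    PySem.Str.join "\n" lines

-- ===== PORT B =====
def format_entity_relationships_details_py_alt (entity_id : String) (relationships : List (List (String × String))) : String :=
  if relationships = [] then
    "Entity " ++ entity_id ++ " has no relationships."
  else
    -- distinct relationship types in first-appearance order
    let types : List String := PySem.List.dedup (relationships.map (fun rel => pvKey rel "type"))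
    let lines :=
      types.foldl
        (fun lines rel_type =>
          let group := relationships.filter (fun rel => pvKey rel "type" == rel_type)
          lines ++ [pvHeader rel_type group.length] ++ group.map (pvRelLine entity_id) ++ [""])
        ["# Relationships for " ++ entity_id ++ "\n"]
    PySem.Str.join "\n" lines

-- ===== PRECONDITION & SPEC =====
-- Pre_ excludes exactly the inputs where the Python raises KeyError: some relationship lacks "type"
-- or "source_id", or an outgoing one (source_id == entity_id) lacks "target_id".
def Pre_format_entity_relationships_details_py (entity_id : String) (relationships : List (List (String × String))) : Prop :=
  ∀ rel ∈ relationships,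
    (PySem.Dict.mk rel).contains "type" = true ∧
    (PySem.Dict.mk rel).contains "source_id" = true ∧
    (pvKey rel "source_id" = entity_id → (PySem.Dict.mk rel).contains "target_id" = true)
instance (entity_id : String) (relationships : List (List (String × String))) : Decidable (Pre_format_entity_relationships_details_py entity_id relationships) := by unfold Pre_format_entity_relationships_details_py; infer_instance

def pvWitness_format_entity_relationships_details_py : String × (List (List (String × String))) :=
  ("E1", [[("type", "depends on"), ("source_id", "E1"), ("target_id", "E2")],
          [("type", "blocks"), ("source_id", "E3"), ("target_id", "E1"), ("source_title", "Other")]])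

def Spec_format_entity_relationships_details_py (entity_id : String) (relationships : List (List (String × String))) (out : String) : Prop := out = format_entity_relationships_details_py_alt entity_id relationships
instance (entity_id : String) (relationships : List (List (String × String))) (out : String) : Decidable (Spec_format_entity_relationships_details_py entity_id relationships out) := by unfold Spec_format_entity_relationships_details_py; infer_instance

-- ===== CLAIM (what is proved, stated in full; the proofs are below) =====
def Claim_equal_format_entity_relationships_details_py : Prop := ∀ (entity_id : String) (relationships : List (List (String × String))), Dom_format_entity_relationships_details_py entity_id relationships → Pre_format_entity_relationships_details_py entity_id relationships → Spec_format_entity_relationships_details_py entity_id relationships (format_entity_relationships_details_py entity_id relationships)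

-- ===== LEMMAS AND PROOFS =====

-- the text block a single type contributes
def pvBlock (entity_id : String) (rel_type : String) (group : List (List (String × String))) : List String :=
  [pvHeader rel_type group.length] ++ group.map (pvRelLine entity_id) ++ [""]

-- A's grouping step (guarded insert of [], then append) is a single modify
theorem pvStep_eq (d : PySem.Dict String (List (List (String × String)))) (k : String)
    (v : List (String × String)) :
    (let d' := if d.contains k then d else d.insert k [];
     d'.insert k (d'.getD k [] ++ [v])) = d.modify k [] (· ++ [v]) := by
  by_cases h : d.contains k = true
  · simp [h, PySem.Dict.modify]
  · simp only [h, Bool.false_eq_true, if_false]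
    rw [PySem.Dict.getD_insert_self, PySem.Dict.insert_insert_self, PySem.Dict.modify]
    have hd : d.getD k ([] : List (List (String × String))) = [] :=
      PySem.Dict.getD_of_not_contains (k := k) d [] (by simp [h])
    rw [hd]

-- A's grouped dict, characterised: its items are the distinct types in first-appearance order,
-- each paired with the sublist of relationships of that type
theorem pvByType_items (relationships : List (List (String × String))) :
    (relationships.foldl
        (fun by_type rel =>
          let rel_type := pvKey rel "type"
          let by_type := if by_type.contains rel_type then by_type else by_type.insert rel_type []
          by_type.insert rel_type (by_type.getD rel_type [] ++ [rel]))
        (PySem.Dict.empty : PySem.Dict String (List (List (String × String))))).items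
      = (PySem.List.dedup (relationships.map (fun rel => pvKey rel "type"))).map
          (fun t => (t, relationships.filter (fun rel => pvKey rel "type" == t))) := by
  have hfold : relationships.foldl
        (fun by_type rel =>
          let rel_type := pvKey rel "type"
          let by_type := if by_type.contains rel_type then by_type else by_type.insert rel_type []
          by_type.insert rel_type (by_type.getD rel_type [] ++ [rel]))
        (PySem.Dict.empty : PySem.Dict String (List (List (String × String))))
      = relationships.foldl (fun d rel => d.modify (pvKey rel "type") [] (· ++ [rel])) PySem.Dict.empty := by
    refine PySem.List.foldl_congr_mem _ _ _ _ ?_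
    intro acc rel _; exact pvStep_eq acc (pvKey rel "type") rel
  rw [hfold]
  have hnodup : (relationships.foldl (fun d rel => d.modify (pvKey rel "type") [] (· ++ [rel]))
      (PySem.Dict.empty : PySem.Dict String (List (List (String × String))))).keys.Nodup := by
    exact PySem.Dict.nodup_keys_foldl_modify_key relationships (fun rel => pvKey rel "type") []
      (fun _ rel => (· ++ [rel])) _ (by simp)
  rw [PySem.Dict.items_eq_map_keys _ hnodup []]
  have hkeys : (relationships.foldl (fun d rel => d.modify (pvKey rel "type") [] (· ++ [rel]))
      (PySem.Dict.empty : PySem.Dict String (List (List (String × String))))).keys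
      = PySem.List.dedup (relationships.map (fun rel => pvKey rel "type")) := by
    rw [PySem.Dict.keys_foldl_modify_key relationships (fun rel => pvKey rel "type") []
      (fun _ rel => (· ++ [rel])) _]
    simp [PySem.Dict.keys_empty, PySem.List.dedup, PySem.Set.update, PySem.Set.ofList_eq_foldl]
  rw [hkeys]
  refine List.map_congr_left ?_
  intro t _
  have hmap : relationships.foldl (fun d rel => d.modify (pvKey rel "type") [] (· ++ [rel]))
      (PySem.Dict.empty : PySem.Dict String (List (List (String × String))))
      = (relationships.map (fun rel => (pvKey rel "type", rel))).foldl
          (fun d p => d.modify p.1 [] (· ++ [p.2])) PySem.Dict.empty := by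
    rw [List.foldl_map]
  rw [hmap, PySem.Dict.getD_foldl_modify_append]
  simp [PySem.Dict.getD_empty, List.filter_map, Function.comp_def]

-- A's per-type output loop, flattened
theorem pvALoop (entity_id : String) (items : List (String × List (List (String × String))))
    (lines : List String) :
    items.foldl
        (fun lines tr =>
          let lines := lines ++ [pvHeader tr.1 tr.2.length]
          let lines := tr.2.foldl (fun lines rel => lines ++ [pvRelLine entity_id rel]) lines
          lines ++ [""])
        lines
      = lines ++ items.flatMap (fun tr => pvBlock entity_id tr.1 tr.2) := by
  rw [PySem.List.foldl_congr_mem _ _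
    (fun lines tr => lines ++ pvBlock entity_id tr.1 tr.2) _ ?_]
  · exact PySem.List.foldl_append_eq_flatMap _ _ _
  · intro acc tr _
    simp only [PySem.List.foldl_append_singleton_eq_map, pvBlock, List.append_assoc]

-- B's per-type output loop, flattened
theorem pvBLoop (entity_id : String) (relationships : List (List (String × String)))
    (types : List String) (lines : List String) :
    types.foldl
        (fun lines rel_type =>
          let group := relationships.filter (fun rel => pvKey rel "type" == rel_type)
          lines ++ [pvHeader rel_type group.length] ++ group.map (pvRelLine entity_id) ++ [""])
        lines
      = lines ++ types.flatMap
          (fun t => pvBlock entity_id t (relationships.filter (fun rel => pvKey rel "type" == t))) := by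
  rw [PySem.List.foldl_congr_mem _ _
    (fun lines t => lines ++ pvBlock entity_id t (relationships.filter (fun rel => pvKey rel "type" == t))) _ ?_]
  · exact PySem.List.foldl_append_eq_flatMap _ _ _
  · intro acc t _
    simp only [pvBlock, List.append_assoc]

-- ===== VERDICT (by name: the statement is the Claim_ definition above) =====
theorem format_entity_relationships_details_py_spec : Claim_equal_format_entity_relationships_details_py := by
  intro entity_id relationships _ _
  unfold Spec_format_entity_relationships_details_py
  unfold format_entity_relationships_details_py format_entity_relationships_details_py_alt
  by_cases h : relationships = []
  · simp [h]
  · simp only [h, if_false]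
    rw [pvALoop, pvBLoop, pvByType_items, List.flatMap_map]
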